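-- pv_equiv track=rewrite | github.com/gramps-project/gramps | gramps/gen/lib/gcalendar.py | _tishri_molad
-- ===== SOURCE A (Python) =====
-- _HBR_HALAKIM_PER_DAY = 25920
--
-- _HBR_HALAKIM_PER_LUNAR_CYCLE = 29 * _HBR_HALAKIM_PER_DAY + 13753
--
-- _HBR_HALAKIM_PER_METONIC_CYCLE = _HBR_HALAKIM_PER_LUNAR_CYCLE * (12 * 19 + 7)
--
-- _HBR_NEW_MOON_OF_CREATION = 31524
--
-- _HBR_MONTHS_PER_YEAR = [
--     12, 12, 13, 12, 12, 13, 12, 13, 12, 12,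
--     13, 12, 12, 13, 12, 12, 13, 12, 13
--     ]
--
-- def _tishri_molad(input_day):
--     """
--     Estimate the metonic cycle number.
--
--     Note that this may be an under estimate because there are 6939.6896 days
--     in a metonic cycle not 6940, but it will never be an over estimate. The
--     loop below will correct for any error in this estimate.
--     """
--
--     metonic_cycle = (input_day + 310) // 6940
--
--     # Calculate the time of the starting molad for this metonic cycle.
--
--     (molad_day, molad_halakim) = _molad_of_metonic_cycle(metonic_cycle)
--
--     # If the above was an under estimate, increment the cycle number until
--     # the correct one is found.  For modern dates this loop is about 98.6%
--     # likely to not execute, even once, because the above estimate is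
--     # really quite close.
--
--     while molad_day < (input_day - 6940 + 310):
--         metonic_cycle += 1
--         molad_halakim += _HBR_HALAKIM_PER_METONIC_CYCLE
--         molad_day += molad_halakim // _HBR_HALAKIM_PER_DAY
--         molad_halakim = molad_halakim % _HBR_HALAKIM_PER_DAY
--
--     # Find the molad of Tishri closest to this date.
--
--     for metonic_year in range(0, 20):
--         if molad_day > input_day - 74:
--             break
--
--         molad_halakim += (_HBR_HALAKIM_PER_LUNAR_CYCLE
--                           * _HBR_MONTHS_PER_YEAR[metonic_year])
--         molad_day += molad_halakim // _HBR_HALAKIM_PER_DAY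
--         molad_halakim = molad_halakim % _HBR_HALAKIM_PER_DAY
--
--     return (metonic_cycle, metonic_year, molad_day, molad_halakim)
--
-- def _molad_of_metonic_cycle(metonic_cycle):
--     """
--     Start with the time of the first molad after creation.
--     """
--
--     r1 = _HBR_NEW_MOON_OF_CREATION
--
--     # Calculate metonic_cycle * HALAKIM_PER_METONIC_CYCLE.  The upper 32
--     # bits of the result will be in r2 and the lower 16 bits will be
--     # in r1.
--
--     r1 = r1 + (metonic_cycle * (_HBR_HALAKIM_PER_METONIC_CYCLE & 0xFFFF))
--     r2 = r1 >> 16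
--     r2 = r2 + (metonic_cycle * ((_HBR_HALAKIM_PER_METONIC_CYCLE >> 16)&0xFFFF))
--
--     # Calculate r2r1 / HALAKIM_PER_DAY.  The remainder will be in r1, the
--     # upper 16 bits of the quotient will be in d2 and the lower 16 bits
--     # will be in d1.
--
--     d2 = r2 // _HBR_HALAKIM_PER_DAY
--     r2 -= d2 * _HBR_HALAKIM_PER_DAY
--     r1 = (r2 << 16) | (r1 & 0xFFFF)
--     d1 = r1 // _HBR_HALAKIM_PER_DAY
--     r1 -= d1 * _HBR_HALAKIM_PER_DAY
--
--     molad_day = (d2 << 16) | d1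
--     molad_halakim = r1
--
--     return (molad_day, molad_halakim)
-- ===== SOURCE B (Python) =====
-- _HBR_HALAKIM_PER_DAY = 25920
--
-- _HBR_HALAKIM_PER_LUNAR_CYCLE = 29 * _HBR_HALAKIM_PER_DAY + 13753
--
-- _HBR_HALAKIM_PER_METONIC_CYCLE = _HBR_HALAKIM_PER_LUNAR_CYCLE * (12 * 19 + 7)
--
-- _HBR_NEW_MOON_OF_CREATION = 31524
--
-- _HBR_MONTHS_PER_YEAR = [
--     12, 12, 13, 12, 12, 13, 12, 13, 12, 12,
--     13, 12, 12, 13, 12, 12, 13, 12, 13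
--     ]
--
-- # Cumulative months elapsed before each of the 20 candidate metonic years.
-- _HBR_SUM_MONTHS = [sum(_HBR_MONTHS_PER_YEAR[:y]) for y in range(20)]
--
-- def _tishri_molad(input_day):
--     # Closed form for the metonic cycle: the smallest cycle whose starting
--     # molad day reaches input_day - 6630, but no smaller than the classic
--     # estimate (no correction loop, no bit-twiddling helper).
--     need = (input_day - 6630) * _HBR_HALAKIM_PER_DAY - _HBR_NEW_MOON_OF_CREATION
--     metonic_cycle = max((input_day + 310) // 6940,
--                         -(-need // _HBR_HALAKIM_PER_METONIC_CYCLE))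
--     base = _HBR_NEW_MOON_OF_CREATION + metonic_cycle * _HBR_HALAKIM_PER_METONIC_CYCLE
--
--     # Each candidate Tishri molad is computed directly from the cumulative
--     # month table; pick the first one falling past input_day - 74
--     # (year 19 is the guaranteed last candidate).
--     for metonic_year, s in enumerate(_HBR_SUM_MONTHS):
--         total = base + _HBR_HALAKIM_PER_LUNAR_CYCLE * s
--         if metonic_year == 19 or total // _HBR_HALAKIM_PER_DAY > input_day - 74:
--             break
--
--     return (metonic_cycle, metonic_year,
--             total // _HBR_HALAKIM_PER_DAY, total % _HBR_HALAKIM_PER_DAY)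
-- ===== Notes on version B (the rewrite author's own statement) =====
-- stated objective: alternative
-- what changed: The bit-twiddling helper and the correcting while-loop are replaced by a closed-form metonic cycle (max of the classic estimate and a ceiling division), and the year loop no longer carries a running (day,halakim) state: each candidate Tishri molad is computed directly from a precomputed cumulative-months table and the first candidate past input_day-74 is picked.
import Mathlib
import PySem

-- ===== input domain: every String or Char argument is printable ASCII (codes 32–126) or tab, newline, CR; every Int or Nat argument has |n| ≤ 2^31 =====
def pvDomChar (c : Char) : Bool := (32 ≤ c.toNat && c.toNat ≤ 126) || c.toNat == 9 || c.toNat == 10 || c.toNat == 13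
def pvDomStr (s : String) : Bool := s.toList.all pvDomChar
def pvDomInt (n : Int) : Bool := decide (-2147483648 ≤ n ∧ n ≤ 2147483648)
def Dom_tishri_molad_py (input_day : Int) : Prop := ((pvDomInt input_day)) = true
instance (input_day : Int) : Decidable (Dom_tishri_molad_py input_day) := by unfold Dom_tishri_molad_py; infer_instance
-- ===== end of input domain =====

-- B replaces A's bit-twiddling helper and its correcting while-loop by a closed-form metonic
-- cycle (estimate vs. a ceiling division), and replaces the stateful year loop by a direct
-- search over a precomputed cumulative-months table (objective: alternative).

-- module constants
def hbrHalakimPerDay : Int := 25920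
def hbrHalakimPerLunarCycle : Int := 29 * hbrHalakimPerDay + 13753
def hbrHalakimPerMetonicCycle : Int := hbrHalakimPerLunarCycle * (12 * 19 + 7)
def hbrNewMoonOfCreation : Int := 31524
def hbrMonthsPerYear : List Int := [12, 12, 13, 12, 12, 13, 12, 13, 12, 12, 13, 12, 12, 13, 12, 12, 13, 12, 13]

-- ===== PORT A =====
def moladOfMetonicCycle (metonic_cycle : Int) : Int × Int :=
  let r1 := hbrNewMoonOfCreation
  let r1 := r1 + metonic_cycle * (PySem.Int.band hbrHalakimPerMetonicCycle 0xFFFF)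
  let r2 := r1 >>> (16 : Nat)
  let r2 := r2 + metonic_cycle * (PySem.Int.band (hbrHalakimPerMetonicCycle >>> (16 : Nat)) 0xFFFF)
  let d2 := PySem.Int.floordiv r2 hbrHalakimPerDay
  let r2 := r2 - d2 * hbrHalakimPerDay
  let r1 := PySem.Int.bor (r2 <<< (16 : Nat)) (PySem.Int.band r1 0xFFFF)
  let d1 := PySem.Int.floordiv r1 hbrHalakimPerDay
  let r1 := r1 - d1 * hbrHalakimPerDay
  (PySem.Int.bor (d2 <<< (16 : Nat)) d1, r1)

-- A's while loop; the fuel of 64 only totalizes it (on the claimed |input_day| ≤ 2^31 domain the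
-- loop body runs at most ~15 times)
def tishriWhileA (input_day : Int) : Nat → Int → Int → Int → Int × Int × Int
  | 0, mc, day, hal => (mc, day, hal)
  | fuel + 1, mc, day, hal =>
    if day < input_day - 6940 + 310 then
      let mc := mc + 1
      let hal := hal + hbrHalakimPerMetonicCycle
      let day := day + PySem.Int.floordiv hal hbrHalakimPerDay
      let hal := PySem.Int.mod hal hbrHalakimPerDay
      tishriWhileA input_day fuel mc day hal
    else (mc, day, hal)

-- A's 'for metonic_year in range(0, 20)' loop; 'my' is the last value bound to metonic_year.
-- Python would raise IndexError reading _HBR_MONTHS_PER_YEAR[19] (a 19-element list); pyGetD's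
-- default 0 only totalizes that read — the guard always breaks by year 19 on the claimed domain.
def tishriForA (input_day : Int) : List Int → Int → Int → Int → Int × Int × Int
  | [], my, day, hal => (my, day, hal)
  | y :: rest, _my, day, hal =>
    if day > input_day - 74 then (y, day, hal)
    else
      let hal := hal + hbrHalakimPerLunarCycle * (PySem.List.pyGetD hbrMonthsPerYear y 0)
      let day := day + PySem.Int.floordiv hal hbrHalakimPerDay
      let hal := PySem.Int.mod hal hbrHalakimPerDay
      tishriForA input_day rest y day hal

def tishri_molad_py (input_day : Int) : Int × Int × Int × Int :=
  let metonic_cycle := PySem.Int.floordiv (input_day + 310) 6940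
  let md := moladOfMetonicCycle metonic_cycle
  let w := tishriWhileA input_day 64 metonic_cycle md.1 md.2
  let f := tishriForA input_day (PySem.List.pyRange 0 20 1) 0 w.2.1 w.2.2
  (w.1, f.1, f.2.1, f.2.2)

-- ===== PORT B =====
-- cumulative months elapsed before each of the 20 candidate metonic years
def hbrSumMonths : List Int :=
  (PySem.List.pyRange 0 20 1).map (fun y => (PySem.List.slice hbrMonthsPerYear none (some y)).sum)

-- B's 'for metonic_year, s in enumerate(_HBR_SUM_MONTHS)' search loop; the [] case is
-- unreachable (the loop always breaks at the last entry, year 19)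
def tishriYearB (input_day base : Int) : List (Int × Int) → Int × Int
  | [] => (19, base)
  | (y, s) :: rest =>
    let total := base + hbrHalakimPerLunarCycle * s
    if y = 19 ∨ PySem.Int.floordiv total hbrHalakimPerDay > input_day - 74 then (y, total)
    else tishriYearB input_day base rest

def tishri_molad_py_alt (input_day : Int) : Int × Int × Int × Int :=
  let need := (input_day - 6630) * hbrHalakimPerDay - hbrNewMoonOfCreation
  let metonic_cycle := max (PySem.Int.floordiv (input_day + 310) 6940)
      (-(PySem.Int.floordiv (-need) hbrHalakimPerMetonicCycle))
  let base := hbrNewMoonOfCreation + metonic_cycle * hbrHalakimPerMetonicCycle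
  let f := tishriYearB input_day base (PySem.List.enumerate hbrSumMonths 0)
  (metonic_cycle, f.1, PySem.Int.floordiv f.2 hbrHalakimPerDay, PySem.Int.mod f.2 hbrHalakimPerDay)

-- ===== PRECONDITION & SPEC =====
def Spec_tishri_molad_py (input_day : Int) (out : Int × Int × Int × Int) : Prop := out = tishri_molad_py_alt input_day
instance (input_day : Int) (out : Int × Int × Int × Int) : Decidable (Spec_tishri_molad_py input_day out) := by unfold Spec_tishri_molad_py; infer_instance

-- ===== CLAIM (what is proved, stated in full; the proofs are below) =====
def Claim_equal_tishri_molad_py : Prop := ∀ (input_day : Int), Dom_tishri_molad_py input_day → Spec_tishri_molad_py input_day (tishri_molad_py input_day)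

-- ===== LEMMAS AND PROOFS =====

-- Python's a & 0xFFFF is a mod 2^16, also for negative a
theorem band_mask (a : Int) : PySem.Int.band a 65535 = a % 65536 := by
  unfold PySem.Int.band
  have ht : Int.toNat 65535 = 65535 := rfl
  have e : (65535 : Nat) = 2 ^ 16 - 1 := by norm_num
  have hb : (0 : Int) ≤ 65535 := by norm_num
  split_ifs with h
  · rw [ht]
    have hm : a.toNat &&& 65535 = a.toNat % 65536 := by
      rw [e]; exact Nat.and_two_pow_sub_one_eq_mod a.toNat 16
    omega
  · rw [ht]
    have hm : 65535 &&& (-a - 1).toNat = (-a - 1).toNat % 65536 := by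
      rw [Nat.land_comm, e]; exact Nat.and_two_pow_sub_one_eq_mod (-a - 1).toNat 16
    omega

-- Python's a >> 16 is floor division by 2^16
theorem shr16 (a : Int) : a >>> (16 : Nat) = a / 65536 := by
  cases a with
  | ofNat n =>
    show (Int.ofNat (n >>> 16)) = _
    rw [Nat.shiftRight_eq_div_pow]
    simp only [show (2 : Nat) ^ 16 = 65536 from by norm_num, Int.ofNat_eq_natCast]
    omega
  | negSucc n =>
    show (Int.negSucc (n >>> 16)) = _
    rw [Nat.shiftRight_eq_div_pow, Int.negSucc_eq, Int.negSucc_eq]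
    simp only [show (2 : Nat) ^ 16 = 65536 from by norm_num]
    omega

-- Python's a << 16 is multiplication by 2^16
theorem shl16 (a : Int) : a <<< (16 : Nat) = a * 65536 := by
  cases a with
  | ofNat n =>
    show (Int.ofNat (n <<< 16)) = _
    rw [Nat.shiftLeft_eq]
    simp only [show (2 : Nat) ^ 16 = 65536 from by norm_num, Int.ofNat_eq_natCast]
    omega
  | negSucc n =>
    show (Int.negSucc ((n + 1) <<< 16 - 1)) = _
    rw [Nat.shiftLeft_eq, Int.negSucc_eq, Int.negSucc_eq]
    simp only [show (2 : Nat) ^ 16 = 65536 from by norm_num]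
    omega

-- Python's a | b is a + b when a's low 16 bits are clear and 0 ≤ b < 2^16
theorem bor_disjoint (a b : Int) (ha : a % 65536 = 0) (hb0 : 0 ≤ b) (hb : b < 65536) :
    PySem.Int.bor a b = a + b := by
  unfold PySem.Int.bor
  split_ifs with h
  · have hor : a.toNat ||| b.toNat = a.toNat + b.toNat := by
      have hrw : a.toNat = 2 ^ 16 * (a.toNat / 65536) := by omega
      rw [hrw, ← Nat.two_pow_add_eq_or_of_lt (i := 16) (b := b.toNat) (by omega) (a.toNat / 65536)]
    omega
  · have hm : (-a - 1).toNat % 65536 = 65535 := by omega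
    have hand : (-a - 1).toNat &&& b.toNat = b.toNat := by
      apply Nat.eq_of_testBit_eq
      intro i
      rw [Nat.testBit_and]
      by_cases hi : i < 16
      · have hlow : ((-a - 1).toNat % 65536).testBit i = (-a - 1).toNat.testBit i := by
          rw [show (65536 : Nat) = 2 ^ 16 from by norm_num, Nat.testBit_mod_two_pow]
          simp [hi]
        have h1 : ((65535 : Nat)).testBit i = true := by
          rw [show (65535 : Nat) = 2 ^ 16 - 1 from by norm_num, Nat.testBit_two_pow_sub_one]
          simp [hi]
        rw [hm, h1] at hlow
        rw [← hlow]
        simp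
      · have hf : b.toNat.testBit i = false := by
          apply Nat.testBit_eq_false_of_lt
          calc b.toNat < 65536 := by omega
            _ = 2 ^ 16 := by norm_num
            _ ≤ 2 ^ i := Nat.pow_le_pow_right (by norm_num) (by omega)
        simp [hf]
    rw [hand]; omega

-- A's bit-twiddling helper computes exactly divmod of the full halakim total
theorem molad_eq (mc : Int) :
    moladOfMetonicCycle mc =
      ((31524 + mc * 179876755) / 25920, (31524 + mc * 179876755) % 25920) := by
  have hfd25920 : ∀ a : Int, PySem.Int.floordiv a 25920 = a / 25920 := fun a =>
    PySem.Int.floordiv_eq_ediv_of_pos (by norm_num)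
  unfold moladOfMetonicCycle hbrNewMoonOfCreation hbrHalakimPerMetonicCycle
    hbrHalakimPerLunarCycle hbrHalakimPerDay
  simp only [shr16, shl16, band_mask, hfd25920]
  norm_num
  set r1 : Int := 31524 + mc * 45971 with hr1
  set r2 : Int := r1 / 65536 + mc * 2744 with hr2
  set d2 : Int := r2 / 25920 with hd2
  rw [bor_disjoint ((r2 - d2 * 25920) * 65536) (r1 % 65536) (by omega) (by omega) (by omega)]
  set r1' : Int := (r2 - d2 * 25920) * 65536 + r1 % 65536 with hr1'
  set d1 : Int := r1' / 25920 with hd1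
  rw [bor_disjoint (d2 * 65536) d1 (by omega) (by omega) (by omega)]
  constructor <;> omega

theorem hfd (a : Int) : PySem.Int.floordiv a hbrHalakimPerDay = a / 25920 := by
  unfold hbrHalakimPerDay; exact PySem.Int.floordiv_eq_ediv_of_pos (by norm_num)

theorem hmd (a : Int) : PySem.Int.mod a hbrHalakimPerDay = a % 25920 := by
  unfold hbrHalakimPerDay; exact PySem.Int.mod_eq_emod_of_pos (by norm_num)

-- A's while loop lands exactly on B's closed-form cycle number M (the max of the estimate
-- and the ceiling division), carrying divmod of the running halakim total
theorem whileA_closed (input_day M : Int)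
    (hM : M = max ((input_day + 310) / 6940)
      (-((-((input_day - 6630) * 25920 - 31524)) / 179876755))) :
    ∀ (fuel : Nat) (mc : Int), (input_day + 310) / 6940 ≤ mc → mc ≤ M → M ≤ mc + fuel →
    tishriWhileA input_day fuel mc ((31524 + mc * 179876755) / 25920)
        ((31524 + mc * 179876755) % 25920)
      = (M, (31524 + M * 179876755) / 25920, (31524 + M * 179876755) % 25920) := by
  intro fuel
  induction fuel with
  | zero =>
    intro mc hest hle hfu
    have : mc = M := by omega
    subst this
    simp [tishriWhileA]
  | succ n ih =>
    intro mc hest hle hfu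
    simp only [tishriWhileA, hfd, hmd]
    by_cases hc : (31524 + mc * 179876755) / 25920 < input_day - 6940 + 310
    · rw [if_pos hc]
      have hlt : mc < M := by omega
      have e1 : (31524 + mc * 179876755) / 25920 +
          ((31524 + mc * 179876755) % 25920 + hbrHalakimPerMetonicCycle) / 25920
          = (31524 + (mc + 1) * 179876755) / 25920 := by
        unfold hbrHalakimPerMetonicCycle hbrHalakimPerLunarCycle hbrHalakimPerDay
        omega
      have e2 : ((31524 + mc * 179876755) % 25920 + hbrHalakimPerMetonicCycle) % 25920
          = (31524 + (mc + 1) * 179876755) % 25920 := by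
        unfold hbrHalakimPerMetonicCycle hbrHalakimPerLunarCycle hbrHalakimPerDay
        omega
      rw [e1, e2]
      exact ih (mc + 1) (by omega) (by omega) (by omega)
    · rw [if_neg hc]
      have : mc = M := by omega
      subst this
      rfl

-- the cumulative-months chain: each entry equals the running sum, all non-last years ≠ 19,
-- the last year = 19
def chainOk : Int → List (Int × Int) → Bool
  | _, [] => false
  | s0, [(y, s)] => s == s0 && y == 19
  | s0, (y, s) :: p :: rest =>
    s == s0 && y != 19 && chainOk (s0 + PySem.List.pyGetD hbrMonthsPerYear y 0) (p :: rest)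

-- A's stateful year loop and B's table search stay in lockstep: A's (day, halakim) pair is
-- divmod of B's candidate total T + 765433 * s
theorem year_eq (input_day T : Int) : ∀ (ys : List (Int × Int)) (s my day hal : Int),
    chainOk s ys = true → day * 25920 + hal = T + 765433 * s → 0 ≤ hal → hal < 25920 →
    tishriForA input_day (ys.map Prod.fst) my day hal =
      ((tishriYearB input_day T ys).1, (tishriYearB input_day T ys).2 / 25920,
       (tishriYearB input_day T ys).2 % 25920) := by
  intro ys
  induction ys with
  | nil => intro s my day hal hch; simp [chainOk] at hch
  | cons p tl ih =>
    obtain ⟨y, sv⟩ := p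
    intro s my day hal hch hinv h0 h1
    have hL : hbrHalakimPerLunarCycle = 765433 := by decide
    cases tl with
    | nil =>
      simp only [chainOk, Bool.and_eq_true, beq_iff_eq] at hch
      obtain ⟨hsv, hy⟩ := hch
      subst hy
      have hs : T + hbrHalakimPerLunarCycle * sv = day * 25920 + hal := by
        rw [hL, hsv]; omega
      have m19 : PySem.List.pyGetD hbrMonthsPerYear 19 0 = 0 := by decide
      simp only [List.map_cons, List.map_nil, tishriForA, tishriYearB, hfd, hmd, hs, m19,
        mul_zero, add_zero, true_or, if_true]
      split_ifs with hc <;> simp only [Prod.mk.injEq] <;>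
        exact ⟨trivial, by omega, by omega⟩
    | cons q tl' =>
      simp only [chainOk, Bool.and_eq_true, beq_iff_eq, bne_iff_ne] at hch
      obtain ⟨⟨hsv, hy⟩, hrest⟩ := hch
      have hs : T + hbrHalakimPerLunarCycle * sv = day * 25920 + hal := by
        rw [hL, hsv]; omega
      rw [List.map_cons, tishriForA, tishriYearB]
      simp only [hfd, hmd, hs]
      by_cases hc : day > input_day - 74
      · rw [if_pos hc, if_pos (Or.inr (by omega))]
        simp only [Prod.mk.injEq]
        exact ⟨trivial, by omega, by omega⟩
      · rw [if_neg hc, if_neg (not_or.mpr ⟨hy, by omega⟩)]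
        have happ := ih (s + PySem.List.pyGetD hbrMonthsPerYear y 0) y
          (day + (hal + hbrHalakimPerLunarCycle * PySem.List.pyGetD hbrMonthsPerYear y 0) / 25920)
          ((hal + hbrHalakimPerLunarCycle * PySem.List.pyGetD hbrMonthsPerYear y 0) % 25920)
          hrest (by rw [hL] at *; omega) (by rw [hL]; omega) (by rw [hL]; omega)
        simpa using happ

theorem chain_init : chainOk 0 (PySem.List.enumerate hbrSumMonths 0) = true := by decide

theorem fst_enum : (PySem.List.enumerate hbrSumMonths 0).map Prod.fst = PySem.List.pyRange 0 20 1 := by decide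

-- ===== VERDICT (by name: the statement is the Claim_ definition above) =====
theorem tishri_molad_py_spec : Claim_equal_tishri_molad_py := by
  intro input_day hdom
  unfold Dom_tishri_molad_py pvDomInt at hdom
  simp only [decide_eq_true_eq] at hdom
  unfold Spec_tishri_molad_py tishri_molad_py tishri_molad_py_alt
  dsimp only
  have hfd6940 : PySem.Int.floordiv (input_day + 310) 6940 = (input_day + 310) / 6940 :=
    PySem.Int.floordiv_eq_ediv_of_pos (by norm_num)
  have hneed : -((input_day - 6630) * hbrHalakimPerDay - hbrNewMoonOfCreation)
      = -((input_day - 6630) * 25920 - 31524) := by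
    unfold hbrHalakimPerDay hbrNewMoonOfCreation; ring
  have hfdC : PySem.Int.floordiv (-((input_day - 6630) * 25920 - 31524)) hbrHalakimPerMetonicCycle
      = (-((input_day - 6630) * 25920 - 31524)) / 179876755 := by
    unfold hbrHalakimPerMetonicCycle hbrHalakimPerLunarCycle hbrHalakimPerDay
    exact PySem.Int.floordiv_eq_ediv_of_pos (by norm_num)
  rw [hfd6940, hneed, hfdC]
  set M : Int := max ((input_day + 310) / 6940)
      (-((-((input_day - 6630) * 25920 - 31524)) / 179876755)) with hMdef
  rw [molad_eq]
  rw [whileA_closed input_day M hMdef 64 ((input_day + 310) / 6940) (by omega)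
      (by omega) (by omega : M ≤ (input_day + 310) / 6940 + (64 : Nat))]
  · have hbase : hbrNewMoonOfCreation + M * hbrHalakimPerMetonicCycle = 31524 + M * 179876755 := by
      unfold hbrNewMoonOfCreation hbrHalakimPerMetonicCycle hbrHalakimPerLunarCycle hbrHalakimPerDay
      ring
    rw [← fst_enum,
      year_eq input_day (hbrNewMoonOfCreation + M * hbrHalakimPerMetonicCycle)
        (PySem.List.enumerate hbrSumMonths 0) 0 0
        ((31524 + M * 179876755) / 25920) ((31524 + M * 179876755) % 25920)
        chain_init (by rw [hbase]; omega) (by omega) (by omega)]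
    simp [hfd, hmd]
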